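-- pv_equiv track=rewrite | github.com/EojinK1m/Practice_Algorithm_Problems | programmers/level1/체육복.py | solution
-- ===== SOURCE A (Python) =====
-- def solution(n, lost, reserve):
--     answer = 0
--     st = []
--
--     for s in range(n):
--         st.append(0)
--         if s + 1 in lost:
--             st[s] -= 1
--         if s + 1 in reserve:
--             st[s] += 1
--
--     reserve = [s for s in range(n) if st[s] == 1]
--
--     for r in reserve:
--         f = r + 1
--         b = r - 1
--
--         if not r == 0:
--             if st[b] == -1:
--                 st[b] = 0
--                 st[r] = 0
--                 continue
--         if not r + 1 == n:
--             if st[f] == -1: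
--                 st[f] = 0
--                 st[r] = 0
--
--     answer = n - st.count(-1)
--     return answer
-- ===== SOURCE B (Python) =====
-- def solution(n, lost, reserve):
--     lset = set(lost)
--     rset = set(reserve)
--     unmatched = 0
--     carry = 0  # status of the previous student if still unresolved
--     for p in range(1, n + 1):
--         s = (p in rset) - (p in lset)
--         if s == 1:
--             carry = 0 if carry == -1 else 1
--         elif s == -1:
--             if carry == 1:
--                 carry = 0
--             else:
--                 if carry == -1:
--                     unmatched += 1
--                 carry = -1
--         else:
--             if carry == -1:
--                 unmatched += 1
--             carry = 0
--     if carry == -1: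
--         unmatched += 1
--     return n - unmatched
-- ===== Notes on version B (the rewrite author's own statement) =====
-- stated objective: faster
-- what changed: A scans lost/reserve linearly for every student to build a status array and then iterates over the reserve positions mutating neighbours in that array; B builds the status row once with O(1) set lookups and computes the answer in a single left-to-right scan that consumes adjacent (+1,-1)/(-1,+1) pairs, with no mutation and no loop over reserves.
import Mathlib
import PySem

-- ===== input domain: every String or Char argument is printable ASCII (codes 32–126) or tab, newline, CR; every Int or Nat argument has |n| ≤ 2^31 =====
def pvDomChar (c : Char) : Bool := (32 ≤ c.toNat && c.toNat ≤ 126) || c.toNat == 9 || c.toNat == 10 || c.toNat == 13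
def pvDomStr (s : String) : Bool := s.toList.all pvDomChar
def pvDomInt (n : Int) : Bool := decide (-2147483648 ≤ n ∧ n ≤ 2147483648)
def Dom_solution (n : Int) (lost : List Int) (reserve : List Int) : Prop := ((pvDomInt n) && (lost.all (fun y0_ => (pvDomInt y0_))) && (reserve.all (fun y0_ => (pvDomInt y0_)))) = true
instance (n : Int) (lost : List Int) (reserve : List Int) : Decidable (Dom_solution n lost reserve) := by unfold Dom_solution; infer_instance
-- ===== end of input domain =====

-- B replaces A's status-array mutation pass over the reserve positions by a single
-- left-to-right scan that consumes adjacent (+1,-1)/(-1,+1) pairs (objective: faster).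

-- ===== PORT A =====
-- helper: the body of A's first loop (append status of student s+1)
def pyAppendStep (lost reserve : List Int) (st : List Int) (s : Int) : List Int :=
  let st := st ++ [(0 : Int)]
  let st := if lost.contains (s + 1) then
      PySem.List.pySetD st s (PySem.List.pyGetD st s 0 - 1) else st
  let st := if reserve.contains (s + 1) then
      PySem.List.pySetD st s (PySem.List.pyGetD st s 0 + 1) else st
  st

-- helper: the body of A's second loop (student at index r lends left, else right)
def pyLendStep (n : Int) (st : List Int) (r : Int) : List Int :=
  let f := r + 1
  let b := r - 1
  if !(r == 0) && (PySem.List.pyGetD st b 0 == -1) then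
    PySem.List.pySetD (PySem.List.pySetD st b 0) r 0
  else if !(r + 1 == n) && (PySem.List.pyGetD st f 0 == -1) then
    PySem.List.pySetD (PySem.List.pySetD st f 0) r 0
  else st

def solution (n : Int) (lost : List Int) (reserve : List Int) : Int :=
  let st : List Int := (PySem.List.pyRange 0 n 1).foldl (pyAppendStep lost reserve) []
  let rs := (PySem.List.pyRange 0 n 1).filter (fun s => PySem.List.pyGetD st s 0 == 1)
  let st := rs.foldl (pyLendStep n) st
  n - (PySem.List.count st (-1) : Int)

-- ===== PORT B =====
-- helper: the body of B's for-loop — update (unmatched, carry) with student p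
def bStep (lset rset : PySem.Set Int) (uc : Int × Int) (p : Int) : Int × Int :=
  let s : Int := (if PySem.Set.contains rset p then (1 : Int) else 0) -
    (if PySem.Set.contains lset p then (1 : Int) else 0)
  if s = 1 then (uc.1, if uc.2 = -1 then 0 else 1)
  else if s = -1 then
    (if uc.2 = 1 then (uc.1, 0) else (uc.1 + (if uc.2 = -1 then 1 else 0), -1))
  else (uc.1 + (if uc.2 = -1 then 1 else 0), 0)

def solution_alt (n : Int) (lost : List Int) (reserve : List Int) : Int :=
  let lset : PySem.Set Int := PySem.Set.ofList lost
  let rset : PySem.Set Int := PySem.Set.ofList reserve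
  let r := (PySem.List.pyRange 1 (n + 1) 1).foldl (bStep lset rset) (0, 0)
  n - (r.1 + (if r.2 = -1 then 1 else 0))

-- ===== PRECONDITION & SPEC =====
def Spec_solution (n : Int) (lost : List Int) (reserve : List Int) (out : Int) : Prop := out = solution_alt n lost reserve
instance (n : Int) (lost : List Int) (reserve : List Int) (out : Int) : Decidable (Spec_solution n lost reserve out) := by unfold Spec_solution; infer_instance

-- ===== CLAIM (what is proved, stated in full; the proofs are below) =====
def Claim_equal_solution : Prop := ∀ (n : Int) (lost : List Int) (reserve : List Int), Dom_solution n lost reserve → Spec_solution n lost reserve (solution n lost reserve)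

-- ===== LEMMAS AND PROOFS =====

-- status of student k+1 (index k) after A's first pass
def stVal (lost reserve : List Int) (k : Nat) : Int :=
  (if ((k : Int) + 1) ∈ lost then (-1 : Int) else 0) + (if ((k : Int) + 1) ∈ reserve then 1 else 0)

-- B's carry automaton, on the status value directly (proof-side abstraction of bStep)
def autoStep (uc : Int × Int) (v : Int) : Int × Int :=
  if v = 1 then (uc.1, if uc.2 = -1 then 0 else 1)
  else if v = -1 then
    (if uc.2 = 1 then (uc.1, 0) else (uc.1 + (if uc.2 = -1 then 1 else 0), -1))
  else (uc.1 + (if uc.2 = -1 then 1 else 0), 0)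

-- B's count, as a lookahead recursion on the status row (bridge between bStep and procA)
def countUnmatched : List Int → Int
  | [] => 0
  | [a] => if a = -1 then 1 else 0
  | a :: b :: t =>
    if a = -1 ∧ b = 1 then countUnmatched t
    else if a = 1 ∧ b = -1 then countUnmatched t
    else (if a = -1 then 1 else 0) + countUnmatched (b :: t)

-- A's second pass, written as a structural recursion on the status row
def procA : List Int → List Int
  | [] => []
  | [a] => [a]
  | a :: b :: t =>
    if (a = -1 ∧ b = 1) ∨ (a = 1 ∧ b = -1) then 0 :: 0 :: procA t
    else a :: procA (b :: t)

-- ascending indices of the 1-cells of a status row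
def Rl (s : List Int) : List Nat :=
  (List.range s.length).filter (fun k => s.getD k 0 == 1)

theorem set_append_last (S : List Int) (c v : Int) : (S ++ [c]).set S.length v = S ++ [v] := by
  induction S with
  | nil => rfl
  | cons a t ih => simpa using ih

theorem pyAppendStep_eq (lost reserve : List Int) (S : List Int) (m : Nat)
    (hlen : S.length = m) :
    pyAppendStep lost reserve S (m : Int) = S ++ [stVal lost reserve m] := by
  have hget2 : ∀ c : Int, (S ++ [c]).getD m 0 = c := by
    intro c
    rw [List.getD_append_right _ _ _ _ (by omega)]
    simp [hlen]
  have hset2 : ∀ c v : Int, (S ++ [c]).set m v = S ++ [v] := by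
    intro c v
    rw [← hlen, set_append_last]
  have hget3 : ∀ c : Int, (S ++ [c])[m]?.getD 0 = c := by
    intro c
    rw [List.getElem?_append_right (by omega)]
    simp [hlen]
  by_cases hl : ((m : Int) + 1) ∈ lost <;> by_cases hr : ((m : Int) + 1) ∈ reserve <;>
    [(have bl : lost.contains ((m : Int) + 1) = true := List.contains_iff_mem.mpr hl;
      have br : reserve.contains ((m : Int) + 1) = true := List.contains_iff_mem.mpr hr;
      skip);
     (have bl : lost.contains ((m : Int) + 1) = true := List.contains_iff_mem.mpr hl;
      have br : reserve.contains ((m : Int) + 1) = false :=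
        Bool.eq_false_iff.mpr (fun h => hr (List.contains_iff_mem.mp h));
      skip);
     (have bl : lost.contains ((m : Int) + 1) = false :=
        Bool.eq_false_iff.mpr (fun h => hl (List.contains_iff_mem.mp h));
      have br : reserve.contains ((m : Int) + 1) = true := List.contains_iff_mem.mpr hr;
      skip);
     (have bl : lost.contains ((m : Int) + 1) = false :=
        Bool.eq_false_iff.mpr (fun h => hl (List.contains_iff_mem.mp h));
      have br : reserve.contains ((m : Int) + 1) = false :=
        Bool.eq_false_iff.mpr (fun h => hr (List.contains_iff_mem.mp h));
      skip)] <;>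
  simp [pyAppendStep, bl, br, hget2, hset2, hget3, stVal, hl, hr]

-- A's first pass produces exactly the status map
theorem phase1_eq (lost reserve : List Int) (m : Nat) :
    (PySem.List.pyRange 0 (m : Int) 1).foldl (pyAppendStep lost reserve) [] =
      (List.range m).map (stVal lost reserve) := by
  induction m with
  | zero => simp [PySem.List.pyRange_one_eq_nil]
  | succ m ih =>
    have hcst : ((m + 1 : Nat) : Int) = (m : Int) + 1 := by push_cast; ring
    rw [hcst, PySem.List.pyRange_one_succ_right (by positivity), List.foldl_append, ih,
      List.foldl_cons, List.foldl_nil, List.range_succ, List.map_append, List.map_cons,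
      List.map_nil]
    rw [pyAppendStep_eq lost reserve _ m (by simp)]

theorem rs_eq (n : Int) (lost reserve : List Int) :
    (PySem.List.pyRange 0 (n.toNat : Int) 1).filter
        (fun s => PySem.List.pyGetD ((List.range n.toNat).map (stVal lost reserve)) s 0 == 1) =
      (Rl ((List.range n.toNat).map (stVal lost reserve))).map (fun (k : Nat) => (k : Int)) := by
  have hr : PySem.List.pyRange 0 (n.toNat : Int) 1 =
      (List.range n.toNat).map (fun (k : Nat) => (k : Int)) := by
    rw [PySem.List.pyRange_one, show ((n.toNat : Int) - 0).toNat = n.toNat by omega]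
    simp
  rw [hr, List.filter_map, Rl, List.length_map, List.length_range]
  congr 1
  apply List.filter_congr
  intro k hk
  simp only [Function.comp_apply, PySem.List.pyGetD_natCast]

-- unfolding Rl head by head
theorem Rl_nil : Rl [] = [] := rfl

theorem Rl_cons (a : Int) (s : List Int) :
    Rl (a :: s) = (if a = 1 then [0] else []) ++ (Rl s).map Nat.succ := by
  unfold Rl
  rw [List.length_cons, List.range_succ_eq_map, List.filter_cons, List.filter_map]
  by_cases h : a = 1 <;>
    simp [h, Function.comp_def, List.filter_map]

theorem set_append_right' (P s : List Int) (j : Nat) (v : Int) :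
    (P ++ s).set (P.length + j) v = P ++ s.set j v := by
  induction P with
  | nil => simp
  | cons a t ih => simpa [Nat.succ_add] using ih

theorem getD_append_left' (P s : List Int) (j : Nat) (h : j < P.length) (d : Int) :
    (P ++ s).getD j d = P.getD j d := by
  rw [List.getD_eq_getElem?_getD, List.getD_eq_getElem?_getD, List.getElem?_append_left h]

theorem getD_append_right' (P s : List Int) (j : Nat) (d : Int) :
    (P ++ s).getD (P.length + j) d = s.getD j d := by
  rw [List.getD_append_right _ _ _ _ (by omega)]
  congr 1
  omega

-- the frozen prefix's last cell blocks A's left-lend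
theorem branch1_false (P s : List Int) (h : P.getLast? ≠ some (-1)) :
    (!((P.length : Int) == 0) && (PySem.List.pyGetD (P ++ s) ((P.length : Int) - 1) 0 == -1)) = false := by
  rcases P with _ | ⟨p, P'⟩
  · simp
  · have h1 : ((p :: P').length : Int) - 1 = ((P'.length : Nat) : Int) := by
      simp only [List.length_cons]; push_cast; ring
    rw [h1, PySem.List.pyGetD_natCast, getD_append_left' _ _ _ (by simp)]
    have h4 : (p :: P')[P'.length] ≠ -1 := by
      intro hc
      apply h
      rw [List.getLast?_eq_getElem?]
      simp only [List.length_cons, Nat.add_sub_cancel]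
      rw [List.getElem?_eq_getElem (by simp)]
      exact congrArg some hc
    have h5 : (p :: P').getD P'.length 0 = (p :: P')[P'.length] :=
      List.getD_eq_getElem _ _ (by simp)
    simp only [h5]
    simp
    exact fun _ => h4

-- evaluating one pyLendStep at the border of the frozen prefix, per head shape
theorem stepA (nI : Int) (P t : List Int) :
    pyLendStep nI (P ++ (-1 : Int) :: 1 :: t) ((P.length + 1 : Nat) : Int) =
      (P ++ [(0 : Int), 0]) ++ t := by
  have e1 : ((P.length + 1 : Nat) : Int) - 1 = ((P.length : Nat) : Int) := by push_cast; ring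
  have e0 : (((P.length + 1 : Nat) : Int) == 0) = false := by
    rw [beq_eq_false_iff_ne]; push_cast; omega
  have eg : PySem.List.pyGetD (P ++ (-1 : Int) :: 1 :: t) ((P.length : Nat) : Int) 0 = -1 := by
    rw [PySem.List.pyGetD_natCast]
    simpa using getD_append_right' P ((-1 : Int) :: 1 :: t) 0 0
  have s1 : (P ++ (-1 : Int) :: 1 :: t).set P.length 0 = P ++ (0 : Int) :: 1 :: t :=
    set_append_right' P _ 0 0
  have s2 : (P ++ (0 : Int) :: 1 :: t).set (P.length + 1) 0 = P ++ (0 : Int) :: 0 :: t :=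
    set_append_right' P _ 1 0
  simp only [pyLendStep, e1, e0, eg, Bool.not_false, Bool.true_and]
  norm_num
  rw [show ((P.length : Int) + 1) = ((P.length + 1 : Nat) : Int) by push_cast; ring]
  simp only [PySem.List.pySetD_natCast]
  rw [s2]

theorem stepB (nI : Int) (P t : List Int) (hP : P.getLast? ≠ some (-1))
    (hn : nI ≠ ((P.length + 1 : Nat) : Int)) :
    pyLendStep nI (P ++ (1 : Int) :: -1 :: t) ((P.length : Nat) : Int) =
      (P ++ [(0 : Int), 0]) ++ t := by
  have e2 : ((((P.length : Nat) : Int) + 1) == nI) = false := by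
    rw [beq_eq_false_iff_ne]
    intro hc
    exact hn (by rw [← hc]; push_cast; ring)
  have eg : PySem.List.pyGetD (P ++ (1 : Int) :: -1 :: t) (((P.length : Nat) : Int) + 1) 0 = -1 := by
    rw [show (((P.length : Nat) : Int) + 1) = ((P.length + 1 : Nat) : Int) by push_cast; ring,
      PySem.List.pyGetD_natCast]
    simpa using getD_append_right' P ((1 : Int) :: -1 :: t) 1 0
  have s1 : (P ++ (1 : Int) :: -1 :: t).set (P.length + 1) 0 = P ++ (1 : Int) :: 0 :: t :=
    set_append_right' P _ 1 0
  have s2 : (P ++ (1 : Int) :: 0 :: t).set P.length 0 = P ++ (0 : Int) :: 0 :: t :=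
    set_append_right' P _ 0 0
  simp only [pyLendStep, branch1_false P ((1 : Int) :: -1 :: t) hP, e2, eg, Bool.not_false,
    Bool.true_and, Bool.false_and]
  norm_num
  rw [show ((P.length : Int) + 1) = ((P.length + 1 : Nat) : Int) by push_cast; ring]
  simp only [PySem.List.pySetD_natCast]
  rw [s1, s2]

theorem stepC (nI : Int) (P t : List Int) (b : Int) (hP : P.getLast? ≠ some (-1)) (hb : b ≠ -1) :
    pyLendStep nI (P ++ (1 : Int) :: b :: t) ((P.length : Nat) : Int) = P ++ (1 : Int) :: b :: t := by
  have hg : PySem.List.pyGetD (P ++ (1 : Int) :: b :: t) (((P.length : Nat) : Int) + 1) 0 = b := by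
    rw [show (((P.length : Nat) : Int) + 1) = ((P.length + 1 : Nat) : Int) by push_cast; ring,
      PySem.List.pyGetD_natCast]
    simpa using getD_append_right' P ((1 : Int) :: b :: t) 1 0
  have eg : (PySem.List.pyGetD (P ++ (1 : Int) :: b :: t) (((P.length : Nat) : Int) + 1) 0 == -1) = false := by
    rw [hg, beq_eq_false_iff_ne]
    exact hb
  simp only [pyLendStep, branch1_false P ((1 : Int) :: b :: t) hP, eg, Bool.and_false]
  norm_num

theorem stepD (nI : Int) (P : List Int) (hP : P.getLast? ≠ some (-1))
    (hn : nI = ((P.length + 1 : Nat) : Int)) :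
    pyLendStep nI (P ++ [(1 : Int)]) ((P.length : Nat) : Int) = P ++ [(1 : Int)] := by
  have e2 : ((((P.length : Nat) : Int) + 1) == nI) = true := by
    rw [beq_iff_eq, hn]; push_cast; ring
  simp only [pyLendStep, branch1_false P [(1 : Int)] hP, e2, Bool.not_true, Bool.false_and]
  norm_num

-- A's fold over the 1-cells of a suffix, relative to a frozen prefix P, is procA
theorem fold_procA (m : Nat) : ∀ (s P : List Int), s.length ≤ m →
    (P.getLast? ≠ some (-1) ∨ s.head? ≠ some 1) →
    (Rl s).foldl
        (fun st k => pyLendStep ((P.length + s.length : Nat) : Int) st ((P.length + k : Nat) : Int))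
        (P ++ s) = P ++ procA s := by
  induction m with
  | zero =>
    intro s P hs _
    have hs0 : s = [] := List.eq_nil_of_length_eq_zero (by omega)
    subst hs0
    simp [Rl_nil, procA]
  | succ m ih =>
    intro s P hs hside
    rcases s with _ | ⟨a, s'⟩
    · simp [Rl_nil, procA]
    rcases s' with _ | ⟨b, t⟩
    · -- s = [a]
      by_cases ha : a = 1
      · subst ha
        have hP : P.getLast? ≠ some (-1) := by
          rcases hside with h | h
          · exact h
          · exact absurd rfl h
        rw [Rl_cons, if_pos rfl, Rl_nil]
        simp only [List.map_nil, List.append_nil, List.foldl_cons, List.foldl_nil, Nat.add_zero]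
        rw [procA, stepD _ P hP (by norm_num)]
      · rw [Rl_cons, if_neg ha, Rl_nil]
        simp [procA]
    · -- s = a :: b :: t
      have hlen : t.length ≤ m := by simp at hs; omega
      have hlen' : (b :: t).length ≤ m := by simp at hs ⊢; omega
      have hlast2 : (P ++ [(0 : Int), 0]).getLast? = some 0 := by
        rw [show P ++ [(0 : Int), 0] = (P ++ [0]) ++ [0] by simp]
        simp
      -- congruence between the shifted fold over Rl t and the IH fold (prefix P ++ [0,0])
      have hcong2 : ∀ init : List Int,
          ((Rl t).map (Nat.succ ∘ Nat.succ)).foldl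
              (fun st k => pyLendStep ((P.length + (a :: b :: t).length : Nat) : Int) st
                ((P.length + k : Nat) : Int)) init =
            (Rl t).foldl
              (fun st k => pyLendStep (((P ++ [(0 : Int), 0]).length + t.length : Nat) : Int) st
                (((P ++ [(0 : Int), 0]).length + k : Nat) : Int)) init := by
        intro init
        rw [List.foldl_map]
        apply PySem.List.foldl_congr_mem
        intro acc x _
        congr 1
        · congr 1; simp; omega
        · congr 1; simp; omega
      have hcong1 : ∀ (c : Int) (init : List Int),
          ((Rl (b :: t)).map Nat.succ).foldl
              (fun st k => pyLendStep ((P.length + (a :: b :: t).length : Nat) : Int) st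
                ((P.length + k : Nat) : Int)) init =
            (Rl (b :: t)).foldl
              (fun st k => pyLendStep (((P ++ [c]).length + (b :: t).length : Nat) : Int) st
                (((P ++ [c]).length + k : Nat) : Int)) init := by
        intro c init
        rw [List.foldl_map]
        apply PySem.List.foldl_congr_mem
        intro acc x _
        congr 1
        · congr 1; simp; omega
        · congr 1; simp; omega
      by_cases hp1 : a = -1 ∧ b = 1
      · obtain ⟨ha, hb⟩ := hp1
        subst ha; subst hb
        rw [Rl_cons, if_neg (by norm_num), Rl_cons, if_pos rfl]
        simp only [List.nil_append, List.singleton_append, List.map_cons, List.map_map,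
          List.foldl_cons]
        rw [show (P.length + Nat.succ 0) = P.length + 1 by rfl]
        rw [stepA, hcong2 _]
        rw [ih t (P ++ [(0 : Int), 0]) hlen (Or.inl (by rw [hlast2]; decide))]
        rw [procA, if_pos (Or.inl ⟨rfl, rfl⟩)]
        simp
      by_cases hp2 : a = 1 ∧ b = -1
      · obtain ⟨ha, hb⟩ := hp2
        subst ha; subst hb
        have hP : P.getLast? ≠ some (-1) := by
          rcases hside with h | h
          · exact h
          · exact absurd rfl h
        rw [Rl_cons, if_pos rfl, Rl_cons, if_neg (by norm_num)]
        simp only [List.nil_append, List.singleton_append, List.map_map, List.foldl_cons,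
          Nat.add_zero]
        rw [stepB _ P t hP (by
          intro hc
          have hc' := Int.natCast_inj.mp hc
          simp only [List.length_cons] at hc'
          omega), hcong2 _]
        rw [ih t (P ++ [(0 : Int), 0]) hlen (Or.inl (by rw [hlast2]; decide))]
        rw [procA, if_pos (Or.inr ⟨rfl, rfl⟩)]
        simp
      · -- no lendable pair at the head
        have hnp : ¬((a = -1 ∧ b = 1) ∨ (a = 1 ∧ b = -1)) := by tauto
        by_cases ha : a = 1
        · subst ha
          have hb : b ≠ -1 := fun hc => hp2 ⟨rfl, hc⟩
          have hP : P.getLast? ≠ some (-1) := by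
            rcases hside with h | h
            · exact h
            · exact absurd rfl h
          rw [Rl_cons, if_pos rfl]
          simp only [List.singleton_append, List.foldl_cons, Nat.add_zero]
          rw [stepC _ P t b hP hb, hcong1 1 _]
          rw [show P ++ (1 : Int) :: b :: t = (P ++ [1]) ++ (b :: t) by simp]
          rw [ih (b :: t) (P ++ [(1 : Int)]) hlen' (Or.inl (by simp))]
          rw [procA, if_neg hnp]
          simp
        · rw [Rl_cons, if_neg ha]
          simp only [List.nil_append]
          rw [hcong1 a _]
          rw [show P ++ a :: b :: t = (P ++ [a]) ++ (b :: t) by simp]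
          have hside' : (P ++ [a]).getLast? ≠ some (-1) ∨ (b :: t).head? ≠ some 1 := by
            by_cases hb : b = 1
            · left
              have : a ≠ -1 := fun hc => hp1 ⟨hc, hb⟩
              simp [this]
            · right
              simp [hb]
          rw [ih (b :: t) (P ++ [a]) hlen' hside']
          rw [procA, if_neg hnp]
          simp

-- the count of -1 after A's pass is B's unmatched count
theorem count_procA (m : Nat) : ∀ s : List Int, s.length ≤ m →
    (((procA s).count (-1) : Int)) = countUnmatched s := by
  induction m with
  | zero =>
    intro s hs
    have hs0 : s = [] := List.eq_nil_of_length_eq_zero (by omega)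
    subst hs0
    simp [procA, countUnmatched]
  | succ m ih =>
    intro s hs
    rcases s with _ | ⟨a, s'⟩
    · simp [procA, countUnmatched]
    rcases s' with _ | ⟨b, t⟩
    · by_cases ha : a = -1 <;> simp [procA, countUnmatched, ha, List.count_cons]
    · by_cases hp : (a = -1 ∧ b = 1) ∨ (a = 1 ∧ b = -1)
      · have hA : ¬(a = -1) ∨ ¬(b = 1) → (a = 1 ∧ b = -1) := by tauto
        rw [procA, if_pos hp]
        rcases hp with ⟨ha, hb⟩ | ⟨ha, hb⟩ <;> subst ha <;> subst hb <;>
          · rw [countUnmatched]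
            simp only [List.count_cons]
            norm_num
            exact ih t (by simp at hs; omega)
      · have h1 : ¬(a = -1 ∧ b = 1) := fun hc => hp (Or.inl hc)
        have h2 : ¬(a = 1 ∧ b = -1) := fun hc => hp (Or.inr hc)
        rw [procA, if_neg hp, countUnmatched, if_neg h1, if_neg h2]
        rw [← ih (b :: t) (by simp at hs ⊢; omega)]
        by_cases ha : a = -1 <;> simp [ha, List.count_cons] <;> ring

-- each status value is in {-1, 0, 1}
theorem stVal_cases (lost reserve : List Int) (k : Nat) :
    stVal lost reserve k = -1 ∨ stVal lost reserve k = 0 ∨ stVal lost reserve k = 1 := by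
  unfold stVal
  split_ifs <;> norm_num

theorem countUnmatched_zero_cons (t : List Int) :
    countUnmatched ((0 : Int) :: t) = countUnmatched t := by
  rcases t with _ | ⟨b, t'⟩
  · simp [countUnmatched]
  · rw [countUnmatched, if_neg (by norm_num), if_neg (by norm_num)]
    norm_num

-- running the carry automaton is the lookahead count (carry = pending head)
theorem auto_count : ∀ (s : List Int), (∀ x ∈ s, x = -1 ∨ x = 0 ∨ x = 1) →
    ∀ (acc c : Int), (c = -1 ∨ c = 0 ∨ c = 1) →
    (s.foldl autoStep (acc, c)).1 + (if (s.foldl autoStep (acc, c)).2 = -1 then 1 else 0) =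
      acc + countUnmatched (if c = 0 then s else c :: s) := by
  have hifn : ∀ X Y : List Int, (if (-1 : Int) = 0 then X else Y) = Y := fun X Y => by norm_num
  have hifo : ∀ X Y : List Int, (if (1 : Int) = 0 then X else Y) = Y := fun X Y => by norm_num
  have hifz : ∀ X Y : List Int, (if (0 : Int) = 0 then X else Y) = X := fun X Y => by norm_num
  intro s
  induction s with
  | nil =>
    intro _ acc c hc
    rcases hc with hc | hc | hc <;> subst hc <;> simp [countUnmatched]
  | cons v t ih =>
    intro hmem acc c hc
    have hv := hmem v (List.mem_cons_self ..)
    have hmem' : ∀ x ∈ t, x = -1 ∨ x = 0 ∨ x = 1 := fun x hx => hmem x (List.mem_cons_of_mem _ hx)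
    rw [List.foldl_cons]
    rcases hc with hc | hc | hc <;> subst hc <;> rcases hv with hv | hv | hv <;> subst hv
    · -- c = -1, v = -1
      rw [show autoStep (acc, -1) (-1) = (acc + 1, -1) by norm_num [autoStep],
        ih hmem' (acc + 1) (-1) (Or.inl rfl), hifn, hifn,
        show countUnmatched ((-1 : Int) :: -1 :: t) = 1 + countUnmatched ((-1 : Int) :: t) from by
          rw [countUnmatched, if_neg (by norm_num), if_neg (by norm_num)]; norm_num]
      ring
    · -- c = -1, v = 0
      rw [show autoStep (acc, -1) 0 = (acc + 1, 0) by norm_num [autoStep],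
        ih hmem' (acc + 1) 0 (Or.inr (Or.inl rfl)), hifz, hifn,
        show countUnmatched ((-1 : Int) :: 0 :: t) = 1 + countUnmatched ((0 : Int) :: t) from by
          rw [countUnmatched, if_neg (by norm_num), if_neg (by norm_num)]; norm_num,
        countUnmatched_zero_cons]
      ring
    · -- c = -1, v = 1
      rw [show autoStep (acc, -1) 1 = (acc, 0) by norm_num [autoStep],
        ih hmem' acc 0 (Or.inr (Or.inl rfl)), hifz, hifn,
        show countUnmatched ((-1 : Int) :: 1 :: t) = countUnmatched t from by
          rw [countUnmatched, if_pos ⟨rfl, rfl⟩]]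
    · -- c = 0, v = -1
      rw [show autoStep (acc, 0) (-1) = (acc, -1) by norm_num [autoStep],
        ih hmem' acc (-1) (Or.inl rfl), hifn, hifz]
    · -- c = 0, v = 0
      rw [show autoStep (acc, 0) 0 = (acc, 0) by norm_num [autoStep],
        ih hmem' acc 0 (Or.inr (Or.inl rfl)), hifz, hifz, countUnmatched_zero_cons]
    · -- c = 0, v = 1
      rw [show autoStep (acc, 0) 1 = (acc, 1) by norm_num [autoStep],
        ih hmem' acc 1 (Or.inr (Or.inr rfl)), hifo, hifz]
    · -- c = 1, v = -1
      rw [show autoStep (acc, 1) (-1) = (acc, 0) by norm_num [autoStep],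
        ih hmem' acc 0 (Or.inr (Or.inl rfl)), hifz, hifo,
        show countUnmatched ((1 : Int) :: -1 :: t) = countUnmatched t from by
          rw [countUnmatched, if_neg (by norm_num), if_pos ⟨rfl, rfl⟩]]
    · -- c = 1, v = 0
      rw [show autoStep (acc, 1) 0 = (acc, 0) by norm_num [autoStep],
        ih hmem' acc 0 (Or.inr (Or.inl rfl)), hifz, hifo,
        show countUnmatched ((1 : Int) :: 0 :: t) = countUnmatched ((0 : Int) :: t) from by
          rw [countUnmatched, if_neg (by norm_num), if_neg (by norm_num)]; norm_num,
        countUnmatched_zero_cons]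
    · -- c = 1, v = 1
      rw [show autoStep (acc, 1) 1 = (acc, 1) by norm_num [autoStep],
        ih hmem' acc 1 (Or.inr (Or.inr rfl)), hifo, hifo,
        show countUnmatched ((1 : Int) :: 1 :: t) = countUnmatched ((1 : Int) :: t) from by
          rw [countUnmatched, if_neg (by norm_num), if_neg (by norm_num)]; norm_num]

-- B's loop body on student 1 + k computes the automaton step on the status value
theorem bStep_eq (lost reserve : List Int) (uc : Int × Int) (k : Nat) :
    bStep (PySem.Set.ofList lost) (PySem.Set.ofList reserve) uc (1 + (k : Int)) =
      autoStep uc (stVal lost reserve k) := by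
  have hrc : ∀ x : Int, ∀ l : List Int,
      (PySem.Set.contains (PySem.Set.ofList l) x = true) ↔ x ∈ l := by
    intro x l
    rw [PySem.Set.contains_iff, PySem.Set.mem_ofList]
  have hval : (if PySem.Set.contains (PySem.Set.ofList reserve) (1 + (k : Int)) then (1 : Int) else 0) -
      (if PySem.Set.contains (PySem.Set.ofList lost) (1 + (k : Int)) then (1 : Int) else 0) =
      stVal lost reserve k := by
    rw [stVal, show (1 : Int) + (k : Int) = (k : Int) + 1 by ring]
    by_cases hl : ((k : Int) + 1) ∈ lost <;> by_cases hr : ((k : Int) + 1) ∈ reserve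
    · rw [if_pos ((hrc _ _).mpr hr), if_pos ((hrc _ _).mpr hl), if_pos hl, if_pos hr]
      ring
    · rw [if_neg (fun hc => hr ((hrc _ _).mp hc)), if_pos ((hrc _ _).mpr hl), if_pos hl,
        if_neg hr]
      ring
    · rw [if_pos ((hrc _ _).mpr hr), if_neg (fun hc => hl ((hrc _ _).mp hc)), if_neg hl,
        if_pos hr]
      ring
    · rw [if_neg (fun hc => hr ((hrc _ _).mp hc)), if_neg (fun hc => hl ((hrc _ _).mp hc)),
        if_neg hl, if_neg hr]
      ring
  rw [bStep, autoStep]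
  simp only [hval]

-- B's fold over the students is the automaton fold over the status row
theorem fold_bStep_eq (n : Int) (lost reserve : List Int) (init : Int × Int) :
    (PySem.List.pyRange 1 (n + 1) 1).foldl
        (bStep (PySem.Set.ofList lost) (PySem.Set.ofList reserve)) init =
      ((List.range n.toNat).map (stVal lost reserve)).foldl autoStep init := by
  rw [PySem.List.pyRange_one, show (n + 1 - 1) = n from by ring]
  rcases (by omega : n ≤ 0 ∨ 0 < n) with hn | hn
  · rw [show n.toNat = 0 by omega]
    simp
  · rw [List.foldl_map, List.foldl_map]
    apply PySem.List.foldl_congr_mem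
    intro acc k _
    exact bStep_eq lost reserve acc k

theorem main_eq (n : Int) (lost reserve : List Int) :
    solution n lost reserve = solution_alt n lost reserve := by
  simp only [solution, solution_alt]
  rw [fold_bStep_eq]
  rcases (by omega : n ≤ 0 ∨ 0 < n) with hn | hn
  · rw [PySem.List.pyRange_one_eq_nil (by omega), show n.toNat = 0 by omega]
    simp [Rl_nil, procA]
  · have hm : ((n.toNat : Nat) : Int) = n := by omega
    rw [show PySem.List.pyRange 0 n 1 = PySem.List.pyRange 0 ((n.toNat : Nat) : Int) 1 by
      rw [hm]]
    rw [phase1_eq, rs_eq]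
    set st0 : List Int := (List.range n.toNat).map (stVal lost reserve) with hst0
    have hlen0 : st0.length = n.toNat := by simp [hst0]
    have hfold := fold_procA st0.length st0 [] le_rfl (Or.inl (by simp))
    simp only [List.nil_append, List.length_nil, Nat.zero_add] at hfold
    rw [List.foldl_map]
    have hcong : (Rl st0).foldl (fun st k => pyLendStep n st ((k : Nat) : Int)) st0 =
        (Rl st0).foldl (fun st k => pyLendStep ((st0.length : Nat) : Int) st ((k : Nat) : Int))
          st0 := by
      apply PySem.List.foldl_congr_mem
      intro acc x _
      congr 1
      rw [hlen0, hm]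
    have hmem : ∀ x ∈ st0, x = -1 ∨ x = 0 ∨ x = 1 := by
      intro x hx
      rw [hst0, List.mem_map] at hx
      obtain ⟨k, _, rfl⟩ := hx
      exact stVal_cases lost reserve k
    rw [hcong, hfold, PySem.List.count_eq, count_procA st0.length st0 le_rfl,
      auto_count st0 hmem 0 0 (Or.inr (Or.inl rfl))]
    simp

-- ===== VERDICT (by name: the statement is the Claim_ definition above) =====
theorem solution_spec : Claim_equal_solution := by
  intro n lost reserve _
  unfold Spec_solution
  exact main_eq n lost reserve
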